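-- pv_equiv track=rewrite | github.com/rudidev08/x4-foundations-version-diff | src/03_chunk.py | _smallest_interval_key_for_line
-- ===== SOURCE A (Python) =====
-- def _smallest_interval_key_for_line(
--     line_no: int,
--     intervals: list[tuple[int, int, str]],
--     preamble_key: str,
-- ) -> str:
--     best_key = preamble_key
--     best_range: int | None = None
--     for start, end, key in intervals:
--         if start <= line_no <= end:
--             span = end - start
--             if best_range is None or span < best_range:
--                 best_key = key
--                 best_range = span
--     return best_key
-- ===== SOURCE B (Python) =====
-- def _smallest_interval_key_for_line(
--     line_no: int,
--     intervals: list[tuple[int, int, str]],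
--     preamble_key: str,
-- ) -> str:
--     containing = [iv for iv in intervals if iv[0] <= line_no <= iv[1]]
--     ordered = sorted(containing, key=lambda iv: iv[1] - iv[0])
--     return ordered[0][2] if ordered else preamble_key
-- ===== Notes on version B (the rewrite author's own statement) =====
-- stated objective: alternative
-- what changed: Replaces the running-best loop with Option state by filter-then-stable-sort-by-span and taking the first element's key; Python's stable sort keyed only on span reproduces the first-minimal tie-break.
import Mathlib
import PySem

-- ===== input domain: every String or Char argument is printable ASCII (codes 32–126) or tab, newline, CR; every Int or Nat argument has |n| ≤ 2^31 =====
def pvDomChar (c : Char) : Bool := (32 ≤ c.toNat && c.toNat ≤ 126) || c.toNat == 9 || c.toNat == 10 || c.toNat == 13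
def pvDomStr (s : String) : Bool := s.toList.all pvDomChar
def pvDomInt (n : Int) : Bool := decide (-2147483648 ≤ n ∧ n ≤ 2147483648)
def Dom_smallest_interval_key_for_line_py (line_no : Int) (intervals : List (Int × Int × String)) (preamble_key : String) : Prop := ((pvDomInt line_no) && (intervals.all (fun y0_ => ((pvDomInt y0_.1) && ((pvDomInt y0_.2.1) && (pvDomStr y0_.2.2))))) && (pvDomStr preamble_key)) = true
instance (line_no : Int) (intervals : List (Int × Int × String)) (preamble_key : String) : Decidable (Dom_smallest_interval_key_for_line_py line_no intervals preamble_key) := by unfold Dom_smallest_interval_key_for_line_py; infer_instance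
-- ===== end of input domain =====

-- B replaces A's running-best loop by filter, stable sort by span, take first key — an alternative decomposition, not faster.


-- ===== PORT A =====
-- literal port of A: running best (best_key, best_range) with strict '<' update
def smallest_interval_key_for_line_py (line_no : Int) (intervals : List (Int × Int × String)) (preamble_key : String) : String :=
  (intervals.foldl
    (fun (st : String × Option Int) iv =>
      if iv.1 ≤ line_no ∧ line_no ≤ iv.2.1 then
        let span := iv.2.1 - iv.1
        match st.2 with
        | none => (iv.2.2, some span)
        | some br => if span < br then (iv.2.2, some span) else st
      else st)
    (preamble_key, none)).1

-- ===== PORT B =====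
-- port of B: filter the containing intervals, stable-sort by span, take the first key
def smallest_interval_key_for_line_py_alt (line_no : Int) (intervals : List (Int × Int × String)) (preamble_key : String) : String :=
  let containing := intervals.filter (fun iv => decide (iv.1 ≤ line_no ∧ line_no ≤ iv.2.1))
  let ordered := PySem.List.sorted containing (fun iv => iv.2.1 - iv.1)
  match ordered with
  | iv :: _ => iv.2.2
  | [] => preamble_key

-- ===== PRECONDITION & SPEC =====
def Spec_smallest_interval_key_for_line_py (line_no : Int) (intervals : List (Int × Int × String)) (preamble_key : String) (out : String) : Prop := out = smallest_interval_key_for_line_py_alt line_no intervals preamble_key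
instance (line_no : Int) (intervals : List (Int × Int × String)) (preamble_key : String) (out : String) : Decidable (Spec_smallest_interval_key_for_line_py line_no intervals preamble_key out) := by unfold Spec_smallest_interval_key_for_line_py; infer_instance

-- ===== CLAIM (what is proved, stated in full; the proofs are below) =====
def Claim_equal_smallest_interval_key_for_line_py : Prop := ∀ (line_no : Int) (intervals : List (Int × Int × String)) (preamble_key : String), Dom_smallest_interval_key_for_line_py line_no intervals preamble_key → Spec_smallest_interval_key_for_line_py line_no intervals preamble_key (smallest_interval_key_for_line_py line_no intervals preamble_key)

-- ===== LEMMAS AND PROOFS =====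

-- span key
def pvKey (iv : Int × Int × String) : Int := iv.2.1 - iv.1

-- A's loop body after the containment filter has been factored out
def pvStep (st : String × Option Int) (iv : Int × Int × String) : String × Option Int :=
  match st.2 with
  | none => (iv.2.2, some (pvKey iv))
  | some br => if pvKey iv < br then (iv.2.2, some (pvKey iv)) else st

-- the loop state determined by the sorted accumulator
def pvStateOf (pk : String) (acc : List (Int × Int × String)) : String × Option Int :=
  match acc with
  | [] => (pk, none)
  | iv :: _ => (iv.2.2, some (pvKey iv))

def pvIns (acc : List (Int × Int × String)) (x : Int × Int × String) : List (Int × Int × String) :=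
  PySem.List.insertBy (fun a b => decide (pvKey a < pvKey b)) x acc

-- head of acc has minimal key
def pvHeadMin (acc : List (Int × Int × String)) : Prop :=
  match acc with
  | [] => True
  | h :: _ => ∀ y ∈ acc, pvKey h ≤ pvKey y

lemma pvIns_headMin (acc : List (Int × Int × String)) (x : Int × Int × String)
    (h : pvHeadMin acc) : pvHeadMin (pvIns acc x) := by
  cases acc with
  | nil => simp [pvIns, PySem.List.insertBy, pvHeadMin]
  | cons a t =>
    simp only [pvIns, PySem.List.insertBy]
    by_cases hx : pvKey x < pvKey a
    · simp only [hx, decide_true, if_true, pvHeadMin]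
      intro y hy
      rcases List.mem_cons.mp hy with hy | hy
      · subst hy; omega
      · rcases List.mem_cons.mp hy with hy | hy
        · subst hy; omega
        · have := h y (List.mem_cons_of_mem a hy); omega
    · simp only [hx, decide_false, if_false, pvHeadMin]
      intro y hy
      rcases List.mem_cons.mp hy with hy | hy
      · subst hy; omega
      · rcases (PySem.List.mem_insertBy _ x y t).mp hy with hy | hy
        · subst hy; omega
        · exact h y (by simp [hy])

lemma pvStep_ins (pk : String) (acc : List (Int × Int × String)) (x : Int × Int × String)
    (h : pvHeadMin acc) : pvStep (pvStateOf pk acc) x = pvStateOf pk (pvIns acc x) := by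
  cases acc with
  | nil => simp [pvIns, PySem.List.insertBy, pvStateOf, pvStep]
  | cons a t =>
    simp only [pvIns, PySem.List.insertBy, pvStateOf, pvStep]
    by_cases hx : pvKey x < pvKey a
    · simp [hx, pvStateOf]
    · simp [hx, pvStateOf]

lemma pvLoop (l : List (Int × Int × String)) : ∀ (acc : List (Int × Int × String)) (pk : String),
    pvHeadMin acc →
    l.foldl pvStep (pvStateOf pk acc) = pvStateOf pk (l.foldl pvIns acc) := by
  induction l with
  | nil => intro acc pk _; rfl
  | cons x t ih =>
    intro acc pk h
    simp only [List.foldl_cons]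
    rw [pvStep_ins pk acc x h]
    exact ih (pvIns acc x) pk (pvIns_headMin acc x h)

-- ===== VERDICT (by name: the statement is the Claim_ definition above) =====
theorem smallest_interval_key_for_line_py_spec : Claim_equal_smallest_interval_key_for_line_py := by
  intro line_no intervals preamble_key _
  unfold Spec_smallest_interval_key_for_line_py
  unfold smallest_interval_key_for_line_py
  have hbody : (fun (st : String × Option Int) (iv : Int × Int × String) =>
      if iv.1 ≤ line_no ∧ line_no ≤ iv.2.1 then
        let span := iv.2.1 - iv.1
        match st.2 with
        | none => (iv.2.2, some span)
        | some br => if span < br then (iv.2.2, some span) else st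
      else st) =
      (fun st iv => if iv.1 ≤ line_no ∧ line_no ≤ iv.2.1 then pvStep st iv else st) := by
    funext st iv; simp [pvStep, pvKey]
  rw [hbody, PySem.List.foldl_ite_eq_foldl_filter]
  have h0 : (preamble_key, (none : Option Int)) = pvStateOf preamble_key [] := rfl
  rw [h0, pvLoop _ [] preamble_key trivial]
  have hins : (fun (acc : List (Int × Int × String)) x =>
      PySem.List.insertBy (fun a b => decide ((fun iv => iv.2.1 - iv.1) a < (fun iv => iv.2.1 - iv.1) b)) x acc) = pvIns := by
    funext acc x; rfl
  have hB : smallest_interval_key_for_line_py_alt line_no intervals preamble_key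
      = (pvStateOf preamble_key ((intervals.filter (fun iv => decide (iv.1 ≤ line_no ∧ line_no ≤ iv.2.1))).foldl pvIns [])).1 := by
    show (match PySem.List.sorted (intervals.filter (fun iv => decide (iv.1 ≤ line_no ∧ line_no ≤ iv.2.1))) (fun iv => iv.2.1 - iv.1) with
          | iv :: _ => iv.2.2 | [] => preamble_key) = _
    rw [PySem.List.sorted_eq_foldl_insertBy, hins]
    cases List.foldl pvIns [] (intervals.filter fun iv => decide (iv.1 ≤ line_no ∧ line_no ≤ iv.2.1)) <;> rfl
  exact hB.symm
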